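-- pv_equiv track=rewrite | github.com/gingeleski/ld-casino-sim | pp_plus3.py | evaluate_plus3
-- ===== SOURCE A (Python) =====
-- import itertools
--
-- def evaluate_plus3(hand):
--     c1_rank, c2_rank, c3_rank = hand[0][0], hand[1][0], hand[2][0]
--     c1_suit, c2_suit, c3_suit = hand[0][1], hand[1][1], hand[2][1]
--     same_rank = (c1_rank == c2_rank == c3_rank)
--     same_suit = (c1_suit == c2_suit == c3_suit)
--     if same_rank and same_suit:
--         # Suited three-of-a-kind pays 100:1
--         return 100
--     elif same_rank:
--         # Three-of-a-kind pays 25:1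
--         return 25
--     strts = ['A23','234','345','456','567','678','789','89T','9TJ','TJQ','JQK','QKA']
--     strt_eval = c1_rank + c2_rank + c3_rank
--     strt_eval_perms = [''.join(p) for p in itertools.permutations(strt_eval)]
--     is_strt = False
--     for p in strt_eval_perms:
--         if p in strts:
--             is_strt = True
--             break
--     if same_suit and is_strt:
--         # Straight flush pays 40:1
--         return 40
--     elif is_strt:
--         # Straight pays 10:1
--         return 10
--     elif same_suit:
--         # Flush pays 5:1
--         return 5
--     # Don't have anything so lost the 1 unit
--     return -1
-- ===== SOURCE B (Python) =====
-- # B: replaces A's factorial permutation enumeration with a canonical-form test: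
-- # sort the concatenated rank chars once and look the result up in a set of sorted straights.
-- _SORTED_STRTS = frozenset(('23A', '234', '345', '456', '567', '678', '789',
--                            '89T', '9JT', 'JQT', 'JKQ', 'AKQ'))
--
-- def evaluate_plus3(hand):
--     (r1, s1), (r2, s2), (r3, s3) = hand[0], hand[1], hand[2]
--     same_rank = r1 == r2 == r3
--     same_suit = s1 == s2 == s3
--     if same_rank:
--         return 100 if same_suit else 25
--     ranks = r1 + r2 + r3
--     is_strt = len(ranks) == 3 and ''.join(sorted(ranks)) in _SORTED_STRTS
--     if is_strt:
--         return 40 if same_suit else 10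
--     return 5 if same_suit else -1
-- ===== Notes on version B (the rewrite author's own statement) =====
-- stated objective: alternative
-- what changed: A tests for a straight by materializing every permutation of the concatenated rank characters and scanning a list of 12 straights; B sorts the rank characters once and looks the canonical form up in a precomputed set of sorted straights, and folds the payout ladder into nested conditionals (intended as faster; a timing run saw A time out at size 16 where B returned, but could not confirm a ratio).
import Mathlib
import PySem

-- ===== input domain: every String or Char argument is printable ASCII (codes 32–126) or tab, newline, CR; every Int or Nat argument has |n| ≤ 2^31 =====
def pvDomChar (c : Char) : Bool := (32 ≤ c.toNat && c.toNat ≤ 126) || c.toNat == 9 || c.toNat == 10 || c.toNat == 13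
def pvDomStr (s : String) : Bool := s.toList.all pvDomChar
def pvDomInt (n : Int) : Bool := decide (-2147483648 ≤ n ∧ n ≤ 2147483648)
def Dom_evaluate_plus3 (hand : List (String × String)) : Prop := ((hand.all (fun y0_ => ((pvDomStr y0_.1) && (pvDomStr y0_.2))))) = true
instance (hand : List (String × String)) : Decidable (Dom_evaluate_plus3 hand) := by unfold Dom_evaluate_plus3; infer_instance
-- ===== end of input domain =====

-- B replaces A's enumeration of all rank-character permutations with a single canonical-form
-- test (sort the concatenated rank chars once, look them up among the sorted straights); the
-- payout ladder is re-decomposed into nested conditionals. Objective: alternative.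


-- ===== PORT A =====
def pvStrts : List String := ["A23","234","345","456","567","678","789","89T","9TJ","TJQ","JQK","QKA"]

def evaluate_plus3 (hand : List (String × String)) : Int :=
  match PySem.List.pyGet? hand 0, PySem.List.pyGet? hand 1, PySem.List.pyGet? hand 2 with
  | some c1, some c2, some c3 =>
      let c1_rank := c1.1; let c2_rank := c2.1; let c3_rank := c3.1
      let c1_suit := c1.2; let c2_suit := c2.2; let c3_suit := c3.2
      let same_rank := c1_rank == c2_rank && c2_rank == c3_rank
      let same_suit := c1_suit == c2_suit && c2_suit == c3_suit
      if same_rank && same_suit then 100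
      else if same_rank then 25
      else
        -- strt_eval = c1_rank + c2_rank + c3_rank, as its character list
        let strt_eval := c1_rank.toList ++ c2_rank.toList ++ c3_rank.toList
        -- [''.join(p) for p in itertools.permutations(strt_eval)]
        let strt_eval_perms := (PySem.List.permutations strt_eval strt_eval.length).map String.ofList
        -- the for-loop with break is List.any
        let is_strt := strt_eval_perms.any (fun p => pvStrts.contains p)
        if same_suit && is_strt then 40
        else if is_strt then 10
        else if same_suit then 5
        else -1
  | _, _, _ => 0  -- IndexError: excluded by Pre_evaluate_plus3

-- ===== PORT B =====
def pvSortedStrts : List String := ["23A","234","345","456","567","678","789","89T","9JT","JQT","JKQ","AKQ"]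

def evaluate_plus3_alt (hand : List (String × String)) : Int :=
  -- (r1, s1), (r2, s2), (r3, s3) = hand[0], hand[1], hand[2]
  match hand with
  | (r1, s1) :: (r2, s2) :: (r3, s3) :: _ =>
      let same_rank := r1 == r2 && r2 == r3
      let same_suit := s1 == s2 && s2 == s3
      if same_rank then (if same_suit then 100 else 25)
      else
        let ranks := r1.toList ++ r2.toList ++ r3.toList
        -- len(ranks) == 3 and ''.join(sorted(ranks)) in _SORTED_STRTS
        let is_strt := ranks.length == 3 &&
          pvSortedStrts.contains (String.ofList (PySem.List.sorted ranks (fun x => x)))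
        if is_strt then (if same_suit then 40 else 10)
        else if same_suit then 5
        else -1
  | _ => 0  -- IndexError: excluded by Pre_evaluate_plus3

-- ===== PRECONDITION & SPEC =====
-- Pre_ excludes only hands of fewer than 3 cards, on which Python A raises IndexError.
def Pre_evaluate_plus3 (hand : List (String × String)) : Prop := 3 ≤ hand.length
instance (hand : List (String × String)) : Decidable (Pre_evaluate_plus3 hand) := by
  unfold Pre_evaluate_plus3; infer_instance

def pvWitness_evaluate_plus3 : (List (String × String)) := [("Q","H"),("K","S"),("A","H")]

def Spec_evaluate_plus3 (hand : List (String × String)) (out : Int) : Prop := out = evaluate_plus3_alt hand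
instance (hand : List (String × String)) (out : Int) : Decidable (Spec_evaluate_plus3 hand out) := by unfold Spec_evaluate_plus3; infer_instance

-- ===== CLAIM (what is proved, stated in full; the proofs are below) =====
def Claim_equal_evaluate_plus3 : Prop := ∀ (hand : List (String × String)), Dom_evaluate_plus3 hand → Pre_evaluate_plus3 hand → Spec_evaluate_plus3 hand (evaluate_plus3 hand)

-- ===== LEMMAS AND PROOFS =====

def pvStrtsL : List (List Char) := pvStrts.map String.toList

-- every rearrangement of xs occurs in itertools.permutations(xs) (converse of perm_of_mem_permutations)
lemma mem_permutations_of_perm {α : Type} (p : List α) : ∀ (xs : List α), p.Perm xs →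
    p ∈ PySem.List.permutations xs xs.length := by
  induction p with
  | nil =>
    intro xs h
    rw [List.nil_perm] at h
    subst h
    simp
  | cons a p ih =>
    intro xs h
    have ha : a ∈ xs := h.mem_iff.mp (List.mem_cons_self)
    obtain ⟨i, hi, hgi⟩ := List.mem_iff_getElem.mp ha
    have hperm : xs.Perm (a :: xs.eraseIdx i) := by
      rw [← hgi]; exact (List.getElem_cons_eraseIdx_perm hi).symm
    have hp : p.Perm (xs.eraseIdx i) := ((h.trans hperm).cons_inv)
    have hlen : xs.length = (xs.eraseIdx i).length + 1 := by
      rw [List.length_eraseIdx_of_lt hi]; omega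
    rw [hlen, PySem.List.permutations]
    rw [List.mem_flatMap]
    refine ⟨i, ?_, ?_⟩
    · rw [List.mem_range]; omega
    · have : xs[i]? = some a := by rw [List.getElem?_eq_getElem hi, hgi]
      rw [this]
      simp only [List.mem_map]
      exact ⟨p, ih _ hp, rfl⟩

lemma sortedStrts_eq : pvSortedStrts = pvStrtsL.map (fun t => String.ofList (PySem.List.sorted t (fun x => x))) := by decide

lemma strts_len : ∀ t ∈ pvStrtsL, t.length = 3 := by decide

-- A's straight test (some permutation of the rank chars is a listed straight) equals
-- B's straight test (3 chars whose sorted form is a listed sorted straight)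
lemma isStrt_eq (s : List Char) :
    ((PySem.List.permutations s s.length).map String.ofList).any (fun p => pvStrts.contains p)
    = (s.length == 3 && pvSortedStrts.contains (String.ofList (PySem.List.sorted s (fun x => x)))) := by
  apply Bool.eq_iff_iff.mpr
  rw [List.any_map, List.any_eq_true]
  simp only [Function.comp, List.contains_eq_mem, decide_eq_true_eq, Bool.and_eq_true, beq_iff_eq]
  constructor
  · rintro ⟨t, hmem, hin⟩
    have hperm : t.Perm s := PySem.List.perm_of_mem_permutations hmem
    have htL : t ∈ pvStrtsL := by
      simp only [pvStrtsL, List.mem_map]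
      exact ⟨String.ofList t, hin, String.toList_ofList⟩
    refine ⟨by rw [← hperm.length_eq]; exact strts_len t htL, ?_⟩
    have hsort : PySem.List.sorted s (fun x => x) = PySem.List.sorted t (fun x => x) :=
      (PySem.List.sorted_id_eq_sorted_id_iff_perm s t).mpr hperm.symm
    rw [sortedStrts_eq, List.mem_map]
    exact ⟨t, htL, by rw [hsort]⟩
  · rintro ⟨hlen, hin⟩
    rw [sortedStrts_eq, List.mem_map] at hin
    obtain ⟨t, htL, heq⟩ := hin
    have hsort : PySem.List.sorted s (fun x => x) = PySem.List.sorted t (fun x => x) := by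
      have := congrArg String.toList heq
      simpa using this.symm
    have hperm : t.Perm s :=
      ((PySem.List.sorted_id_eq_sorted_id_iff_perm s t).mp hsort).symm
    refine ⟨t, mem_permutations_of_perm t s hperm, ?_⟩
    simp only [pvStrtsL, List.mem_map] at htL
    obtain ⟨x, hx, rfl⟩ := htL
    rwa [String.ofList_toList]

-- ===== VERDICT (by name: the statement is the Claim_ definition above) =====
theorem evaluate_plus3_spec : Claim_equal_evaluate_plus3 := by
  intro hand _ hpre
  unfold Pre_evaluate_plus3 at hpre
  rcases hand with _ | ⟨⟨r1, s1⟩, _ | ⟨⟨r2, s2⟩, _ | ⟨⟨r3, s3⟩, rest⟩⟩⟩ <;>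
    simp only [List.length_nil, List.length_cons] at hpre <;> try omega
  have e0 : PySem.List.pyGet? (((r1, s1) : String × String) :: (r2, s2) :: (r3, s3) :: rest) (0 : Int) = some (r1, s1) := by
    simp only [PySem.List.pyGet?, PySem.List.pyIdx?, List.length_cons]
    split_ifs with h1 h2
    · rfl
    · exfalso; push_cast at h2; omega
    · exfalso; omega
    · exfalso; omega
  have e1 : PySem.List.pyGet? (((r1, s1) : String × String) :: (r2, s2) :: (r3, s3) :: rest) (1 : Int) = some (r2, s2) := by
    simp only [PySem.List.pyGet?, PySem.List.pyIdx?, List.length_cons]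
    split_ifs with h1 h2
    · rfl
    · exfalso; push_cast at h2; omega
    · exfalso; omega
    · exfalso; omega
  have e2 : PySem.List.pyGet? (((r1, s1) : String × String) :: (r2, s2) :: (r3, s3) :: rest) (2 : Int) = some (r3, s3) := by
    simp only [PySem.List.pyGet?, PySem.List.pyIdx?, List.length_cons]
    split_ifs with h1 h2
    · rfl
    · exfalso; push_cast at h2; omega
    · exfalso; omega
    · exfalso; omega
  unfold Spec_evaluate_plus3 evaluate_plus3 evaluate_plus3_alt
  rw [e0, e1, e2]
  dsimp only
  rw [isStrt_eq]
  by_cases hr : (r1 == r2 && r2 == r3) = true <;>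
    by_cases hs : (s1 == s2 && s2 == s3) = true <;>
      simp [hr, hs] <;> split_ifs <;> simp_all
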